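-- pv_equiv track=rewrite | github.com/nanup/DSA | 5 .Cyclic Sort/Find the First K Missing Positive Numbers.py | findFirstKMissingPositive
-- ===== SOURCE A (Python) =====
-- def findFirstKMissingPositive(nums, k):
-- 	missingNumbers = []
--
-- 	i, n = 0, len(nums)
--
-- 	while i < n:
-- 		j = nums[i]
--
-- 		if j > 0 and j <= n and j != nums[j - 1]:
-- 			nums[i], nums[j - 1] = nums[j - 1], nums[i]
-- 		else:
-- 			i += 1
--
-- 	for i in range(len(nums)):
-- 		if nums[i] != i + 1:
-- 			missingNumbers.append(i + 1)
--
-- 			if len(missingNumbers) == k: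
-- 				return missingNumbers
--
-- 	n = max(nums) + 1
--
-- 	while len(missingNumbers) < k:
-- 		missingNumbers.append(n)
-- 		n += 1
--
-- 	return missingNumbers
-- ===== SOURCE B (Python) =====
-- def findFirstKMissingPositive(nums, k):
--     # Set-based rewrite: no in-place cyclic sort (A permutes nums in place; B leaves it
--     # untouched — equivalence is about the return value only).
--     present = set(nums)
--     n = len(nums)
--     missing = []
--     for v in range(1, n + 1):
--         if v not in present:
--             missing.append(v)
--             if len(missing) == k:
--                 return missing
--     m = max(nums) + 1
--     missing.extend(range(m, m + k - len(missing)))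
--     return missing
-- ===== Notes on version B (the rewrite author's own statement) =====
-- stated objective: simpler
-- what changed: Replaces the in-place cyclic-sort permutation plus index scan with a hash set of the input and a direct scan of the values 1..n (and the tail padding with a single range-extend), leaving nums unmutated.
import Mathlib
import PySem

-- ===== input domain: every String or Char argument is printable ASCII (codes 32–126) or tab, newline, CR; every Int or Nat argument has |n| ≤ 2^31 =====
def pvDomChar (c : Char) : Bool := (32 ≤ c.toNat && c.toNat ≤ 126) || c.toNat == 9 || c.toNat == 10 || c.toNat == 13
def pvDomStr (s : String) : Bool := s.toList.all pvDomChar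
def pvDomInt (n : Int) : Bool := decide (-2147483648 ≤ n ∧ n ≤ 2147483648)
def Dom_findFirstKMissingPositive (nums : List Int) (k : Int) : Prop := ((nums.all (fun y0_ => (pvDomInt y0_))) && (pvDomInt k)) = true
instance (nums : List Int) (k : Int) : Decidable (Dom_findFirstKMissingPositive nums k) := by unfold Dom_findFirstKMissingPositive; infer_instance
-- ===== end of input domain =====

-- B replaces A's in-place cyclic sort + index scan by a hash set and a value scan 1..n
-- (objective: simpler). A permutes nums in place, B does not mutate it; the equivalence
-- proved here is about the return value only.

-- ===== PORT A =====

-- number of positions already holding their cyclic-sort value (termination measure only)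
def pvFixed (xs : List Int) : Finset ℕ :=
  (Finset.range xs.length).filter (fun t => xs.getD t 0 = (t : Int) + 1)


theorem pvFixed_card_le (xs : List Int) : (pvFixed xs).card ≤ xs.length := by
  have := Finset.card_filter_le (Finset.range xs.length) (fun t => xs.getD t 0 = (t : Int) + 1)
  simpa [pvFixed] using this

theorem pvGetD_set_ne (l : List Int) (a b : Nat) (v : Int) (hne : a ≠ b) :
    (l.set a v).getD b 0 = l.getD b 0 := by
  simp [List.getD, List.getElem?_set_ne hne]

theorem pvFixed_swap_lt (xs : List Int) (i : Nat) (h : i < xs.length)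
    (hg : 0 < xs.getD i 0 ∧ xs.getD i 0 ≤ (xs.length : Int) ∧
          xs.getD i 0 ≠ xs.getD (xs.getD i 0 - 1).toNat 0) :
    (pvFixed xs).card <
      (pvFixed ((xs.set i (xs.getD (xs.getD i 0 - 1).toNat 0)).set (xs.getD i 0 - 1).toNat (xs.getD i 0))).card := by
  obtain ⟨h1, h2, h3⟩ := hg
  set j := xs.getD i 0 with hj
  set m := (j - 1).toNat with hm
  set xs' := (xs.set i (xs.getD m 0)).set m j with hxs'
  have hmj : (m : Int) = j - 1 := by omega
  have hmlt : m < xs.length := by omega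
  have hlen : xs'.length = xs.length := by simp [hxs']
  have him : i ≠ m := by
    intro he; apply h3; rw [← he, ← hj]
  have hget_ne : ∀ t : Nat, t ≠ i → t ≠ m → xs'.getD t 0 = xs.getD t 0 := by
    intro t hti htm
    rw [hxs', pvGetD_set_ne _ m t _ (fun e => htm e.symm),
        pvGetD_set_ne _ i t _ (fun e => hti e.symm)]
  have hget_m : xs'.getD m 0 = j := by
    simp [hxs', List.getD, hmlt, List.length_set]
  apply Finset.card_lt_card
  constructor
  · intro t ht
    simp only [pvFixed, Finset.mem_filter, Finset.mem_range] at ht ⊢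
    obtain ⟨htn, htv⟩ := ht
    have htm : t ≠ m := by
      intro he; apply h3
      rw [he] at htv; rw [htv]; omega
    have hti : t ≠ i := by
      intro he
      rw [he, ← hj] at htv
      apply htm; omega
    refine ⟨by omega, ?_⟩
    rw [hget_ne t hti htm]; exact htv
  · intro hsub
    have := hsub (show m ∈ pvFixed xs' by
      simp only [pvFixed, Finset.mem_filter, Finset.mem_range]
      refine ⟨by omega, ?_⟩
      rw [hget_m]; omega)
    simp only [pvFixed, Finset.mem_filter, Finset.mem_range] at this
    apply h3
    rw [this.2]; omega


-- the `while i < n` cyclic-sort loop of A (n = len(nums) is invariant under the swaps)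
def pvCyclic (xs : List Int) (i : Nat) : List Int :=
  if h : i < xs.length then
    let j := xs.getD i 0
    if hg : 0 < j ∧ j ≤ (xs.length : Int) ∧ j ≠ xs.getD (j - 1).toNat 0 then
      pvCyclic ((xs.set i (xs.getD (j - 1).toNat 0)).set (j - 1).toNat j) i
    else
      pvCyclic xs (i + 1)
  else xs
termination_by (xs.length - (pvFixed xs).card, xs.length - i)
decreasing_by
  · exact Prod.Lex.left _ _ (by
      have := pvFixed_swap_lt xs i h hg
      have hle := pvFixed_card_le ((xs.set i (xs.getD (xs.getD i 0 - 1).toNat 0)).set (xs.getD i 0 - 1).toNat (xs.getD i 0))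
      have hlen : ((xs.set i (xs.getD (xs.getD i 0 - 1).toNat 0)).set (xs.getD i 0 - 1).toNat (xs.getD i 0)).length = xs.length := by
        simp
      omega)
  · exact Prod.Lex.right _ (by omega)

-- the `for i in range(len(nums))` scan with early return (Bool = returned early)
def pvScanA (xs : List Int) (k : Int) (t : Nat) (acc : List Int) : List Int × Bool :=
  if h : t < xs.length then
    if xs.getD t 0 ≠ (t : Int) + 1 then
      let acc' := acc ++ [(t : Int) + 1]
      if (acc'.length : Int) = k then (acc', true) else pvScanA xs k (t + 1) acc'
    else pvScanA xs k (t + 1) acc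
  else (acc, false)
termination_by xs.length - t

-- the final `while len(missingNumbers) < k` padding loop
def pvPadA (k : Int) (acc : List Int) (m : Int) : List Int :=
  if (acc.length : Int) < k then pvPadA k (acc ++ [m]) (m + 1) else acc
termination_by (k - acc.length).toNat
decreasing_by simp; omega

def findFirstKMissingPositive (nums : List Int) (k : Int) : List Int :=
  let xs := pvCyclic nums 0
  match pvScanA xs k 0 [] with
  | (r, true) => r
  | (r, false) => pvPadA k r ((PySem.List.max? xs (fun y => y)).getD 0 + 1)

-- ===== PORT B =====

-- the `for v in range(1, n + 1)` scan with early return (Bool = returned early)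
def pvScanB (present : PySem.Set Int) (k : Int) (n : Int) (v : Int) (acc : List Int) : List Int × Bool :=
  if h : v < n + 1 then
    if ¬ PySem.Set.contains present v then
      let acc' := acc ++ [v]
      if (acc'.length : Int) = k then (acc', true) else pvScanB present k n (v + 1) acc'
    else pvScanB present k n (v + 1) acc
  else (acc, false)
termination_by (n + 1 - v).toNat
decreasing_by all_goals omega

def findFirstKMissingPositive_alt (nums : List Int) (k : Int) : List Int :=
  let present := PySem.Set.ofList nums
  let n : Int := nums.length
  match pvScanB present k n 1 [] with
  | (r, true) => r
  | (r, false) =>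
      let m := (PySem.List.max? nums (fun y => y)).getD 0 + 1
      r ++ PySem.List.pyRange m (m + (k - r.length)) 1

-- ===== PRECONDITION & SPEC =====
-- Pre_ excludes only nums = [], on which A raises ValueError at max(nums).
def Pre_findFirstKMissingPositive (nums : List Int) (k : Int) : Prop := nums ≠ []
instance (nums : List Int) (k : Int) : Decidable (Pre_findFirstKMissingPositive nums k) := by
  unfold Pre_findFirstKMissingPositive; infer_instance

def pvWitness_findFirstKMissingPositive : List Int × Int := ([3, -1, 4, 5, 5], 4)

def Spec_findFirstKMissingPositive (nums : List Int) (k : Int) (out : List Int) : Prop := out = findFirstKMissingPositive_alt nums k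
instance (nums : List Int) (k : Int) (out : List Int) : Decidable (Spec_findFirstKMissingPositive nums k out) := by unfold Spec_findFirstKMissingPositive; infer_instance

-- ===== CLAIM (what is proved, stated in full; the proofs are below) =====
def Claim_equal_findFirstKMissingPositive : Prop := ∀ (nums : List Int) (k : Int), Dom_findFirstKMissingPositive nums k → Pre_findFirstKMissingPositive nums k → Spec_findFirstKMissingPositive nums k (findFirstKMissingPositive nums k)

-- ===== LEMMAS AND PROOFS =====

-- position t passes cyclic sort's "nothing to do" test in xs
def pvOK (xs : List Int) (t : Nat) : Prop :=
  ¬(0 < xs.getD t 0 ∧ xs.getD t 0 ≤ (xs.length : Int) ∧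
    xs.getD t 0 ≠ xs.getD (xs.getD t 0 - 1).toNat 0)

theorem pvMem_swap (xs : List Int) (i m : Nat) (hi : i < xs.length) (hm : m < xs.length) (v : Int) :
    v ∈ (xs.set i (xs.getD m 0)).set m (xs.getD i 0) ↔ v ∈ xs := by
  have hgd : ∀ (t : Nat) (h : t < xs.length), xs.getD t 0 = xs[t] := by
    intro t h; simp [List.getD_eq_getElem?_getD, List.getElem?_eq_getElem h]
  set ys := (xs.set i (xs.getD m 0)).set m (xs.getD i 0) with hys
  have hlen : ys.length = xs.length := by simp [hys]
  have hget : ∀ (t : Nat) (h : t < xs.length),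
      ys[t]'(by omega) = if t = m then xs[i] else if t = i then xs[m] else xs[t] := by
    intro t h
    simp only [hys, List.getElem_set]
    rcases eq_or_ne t m with rfl | htm
    · simp [List.getD_eq_getElem?_getD, List.getElem?_eq_getElem hi]
    · rcases eq_or_ne t i with rfl | hti
      · simp [List.getD_eq_getElem?_getD, List.getElem?_eq_getElem hm, htm, Ne.symm htm]
      · simp [Ne.symm htm, Ne.symm hti, htm, hti]
  constructor
  · intro hv
    obtain ⟨t, ht, hvt⟩ := List.mem_iff_getElem.mp hv
    rw [hget t (by omega)] at hvt
    split_ifs at hvt with h1 h2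
    · exact hvt ▸ List.getElem_mem hi
    · exact hvt ▸ List.getElem_mem hm
    · exact hvt ▸ List.getElem_mem (by omega)
  · intro hv
    obtain ⟨t, ht, hvt⟩ := List.mem_iff_getElem.mp hv
    apply List.mem_iff_getElem.mpr
    by_cases hti : t = i
    · refine ⟨m, by omega, ?_⟩
      rw [hget m (by omega)]
      have hx : xs[i] = v := by subst hti; exact hvt
      simp [hx]
    · by_cases htm : t = m
      · refine ⟨i, by omega, ?_⟩
        rw [hget i (by omega)]
        have hx : xs[m] = v := by subst htm; exact hvt
        by_cases him : i = m
        · simp [him, hx]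
        · simp [him, hx]
      · refine ⟨t, by omega, ?_⟩
        rw [hget t (by omega)]
        simp [hti, htm, hvt]

theorem pvOK_swap (xs : List Int) (i : Nat) (hi : i < xs.length)
    (h1 : 0 < xs.getD i 0) (h2 : xs.getD i 0 ≤ (xs.length : Int))
    (h3 : xs.getD i 0 ≠ xs.getD (xs.getD i 0 - 1).toNat 0)
    (t : Nat) (hti : t ≠ i) (hok : pvOK xs t) :
    pvOK ((xs.set i (xs.getD (xs.getD i 0 - 1).toNat 0)).set (xs.getD i 0 - 1).toNat (xs.getD i 0)) t := by
  set j := xs.getD i 0 with hj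
  set m := (j - 1).toNat with hm
  set xs' := (xs.set i (xs.getD m 0)).set m j with hxs'
  have hmj : (m : Int) = j - 1 := by omega
  have hmlt : m < xs.length := by omega
  have hlen : xs'.length = xs.length := by simp [hxs']
  have him : i ≠ m := fun he => h3 (by rw [← he, ← hj])
  have hget_ne : ∀ s : Nat, s ≠ i → s ≠ m → xs'.getD s 0 = xs.getD s 0 := by
    intro s hsi hsm
    rw [hxs', pvGetD_set_ne _ m s _ (fun e => hsm e.symm),
        pvGetD_set_ne _ i s _ (fun e => hsi e.symm)]
  have hget_m : xs'.getD m 0 = j := by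
    simp [hxs', List.getD, hmlt, List.length_set]
  by_cases htm : t = m
  · subst htm
    unfold pvOK
    rw [hget_m]
    rintro ⟨-, -, hc⟩
    apply hc
    rw [← hm, hget_m]
  · unfold pvOK at hok ⊢
    rw [hget_ne t hti htm, hlen]
    rintro ⟨hb1, hb2, hb3⟩
    apply hok
    refine ⟨hb1, hb2, ?_⟩
    intro heq
    have hvm : (xs.getD t 0 - 1).toNat ≠ m := by
      intro he
      have hvj : xs.getD t 0 = j := by omega
      apply h3
      calc j = xs.getD t 0 := hvj.symm
        _ = xs.getD (xs.getD t 0 - 1).toNat 0 := heq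
        _ = xs.getD m 0 := by rw [he]
        _ = xs.getD (j - 1).toNat 0 := by rw [← hm]
    have hvi : (xs.getD t 0 - 1).toNat ≠ i := by
      intro he
      have hvj : xs.getD t 0 = j := by
        calc xs.getD t 0 = xs.getD (xs.getD t 0 - 1).toNat 0 := heq
          _ = xs.getD i 0 := by rw [he]
          _ = j := by rw [← hj]
      apply him
      omega
    apply hb3
    rw [hget_ne _ hvi hvm]
    exact heq

theorem pvCyclic_inv (xs₀ : List Int) (i₀ : Nat) :
    (∀ t, t < i₀ → pvOK xs₀ t) →
    ((pvCyclic xs₀ i₀).length = xs₀.length ∧ (∀ v, v ∈ pvCyclic xs₀ i₀ ↔ v ∈ xs₀) ∧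
      (∀ t, t < (pvCyclic xs₀ i₀).length → pvOK (pvCyclic xs₀ i₀) t)) := by
  induction xs₀, i₀ using pvCyclic.induct with
  | case1 xs i hi j hg ih =>
    intro hpre
    obtain ⟨h1, h2, h3⟩ : 0 < xs.getD i 0 ∧ xs.getD i 0 ≤ (xs.length : Int) ∧
        xs.getD i 0 ≠ xs.getD (xs.getD i 0 - 1).toNat 0 := hg
    have hstep : pvCyclic xs i =
        pvCyclic ((xs.set i (xs.getD (xs.getD i 0 - 1).toNat 0)).set (xs.getD i 0 - 1).toNat (xs.getD i 0)) i := by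
      rw [pvCyclic]
      rw [dif_pos hi, dif_pos (show 0 < xs.getD i 0 ∧ xs.getD i 0 ≤ (xs.length : Int) ∧ xs.getD i 0 ≠ xs.getD (xs.getD i 0 - 1).toNat 0 from ⟨h1, h2, h3⟩)]
    have hpre' : ∀ t, t < i →
        pvOK ((xs.set i (xs.getD (xs.getD i 0 - 1).toNat 0)).set (xs.getD i 0 - 1).toNat (xs.getD i 0)) t := by
      intro t ht
      exact pvOK_swap xs i hi h1 h2 h3 t (by omega) (hpre t ht)
    obtain ⟨il, im, iok⟩ := ih hpre'
    have hmlt : (xs.getD i 0 - 1).toNat < xs.length := by omega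
    refine ⟨?_, ?_, ?_⟩
    · rw [hstep, il]; simp
    · intro v
      rw [hstep, im v, pvMem_swap xs i _ hi hmlt v]
    · intro t ht
      rw [hstep] at ht ⊢
      exact iok t ht
  | case2 xs i hi j hg ih =>
    intro hpre
    have hg' : ¬(0 < xs.getD i 0 ∧ xs.getD i 0 ≤ (xs.length : Int) ∧
        xs.getD i 0 ≠ xs.getD (xs.getD i 0 - 1).toNat 0) := hg
    have hstep : pvCyclic xs i = pvCyclic xs (i + 1) := by
      rw [pvCyclic]
      rw [dif_pos hi, dif_neg hg']
    have hpre' : ∀ t, t < i + 1 → pvOK xs t := by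
      intro t ht
      rcases Nat.lt_or_ge t i with h | h
      · exact hpre t h
      · have : t = i := by omega
        subst this
        exact hg'
    obtain ⟨il, im, iok⟩ := ih hpre'
    rw [hstep]
    exact ⟨il, im, iok⟩
  | case3 xs i hi =>
    intro hpre
    have hstep : pvCyclic xs i = xs := by
      rw [pvCyclic]
      simp only [dif_neg hi]
    rw [hstep]
    exact ⟨rfl, fun v => Iff.rfl, fun t ht => hpre t (by omega)⟩

theorem pvGetD_eq_getElem (l : List Int) (t : Nat) (h : t < l.length) : l.getD t 0 = l[t] := by
  simp [List.getD_eq_getElem?_getD, List.getElem?_eq_getElem h]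

theorem pvCyclic_char (nums : List Int) (t : Nat) (ht : t < nums.length) :
    (pvCyclic nums 0).getD t 0 = (t : Int) + 1 ↔ ((t : Int) + 1) ∈ nums := by
  obtain ⟨hl, hmem, hok⟩ := pvCyclic_inv nums 0 (fun s hs => absurd hs (by omega))
  constructor
  · intro h
    rw [← hmem]
    rw [pvGetD_eq_getElem _ t (by omega)] at h
    exact h ▸ List.getElem_mem (by omega)
  · intro h
    rw [← hmem] at h
    obtain ⟨s, hs, hsv⟩ := List.mem_iff_getElem.mp h
    have := hok s (by omega)
    unfold pvOK at this
    rw [pvGetD_eq_getElem _ s (by omega), hsv] at this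
    have heq : ((t : Int) + 1) = (pvCyclic nums 0).getD (((t : Int) + 1) - 1).toNat 0 := by
      by_contra hne
      exact this ⟨by omega, by omega, hne⟩
    have htt : (((t : Int) + 1) - 1).toNat = t := by omega
    rw [htt] at heq
    exact heq.symm

theorem pvMax_eq (nums : List Int) :
    PySem.List.max? (pvCyclic nums 0) (fun y => y) = PySem.List.max? nums (fun y => y) := by
  obtain ⟨hl, hmem, -⟩ := pvCyclic_inv nums 0 (fun s hs => absurd hs (by omega))
  by_cases hn : nums = []
  · have h0 : pvCyclic nums 0 = [] := List.length_eq_zero_iff.mp (by rw [hl, hn]; simp)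
    rw [h0, hn]
  · have h0 : pvCyclic nums 0 ≠ [] := by
      intro he
      apply hn
      apply List.length_eq_zero_iff.mp
      rw [← hl, he]
      simp
    rcases hx : PySem.List.max? (pvCyclic nums 0) (fun y => y) with - | a
    · exact absurd (Iff.mp (PySem.List.max?_eq_none_iff _ _) hx) h0
    rcases hb : PySem.List.max? nums (fun y => y) with - | b
    · exact absurd (Iff.mp (PySem.List.max?_eq_none_iff _ _) hb) hn
    have ha' := PySem.List.max?_mem hx
    have hb' := PySem.List.max?_mem hb
    have hab := PySem.List.max?_isMax hb a ((hmem a).mp ha')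
    have hba := PySem.List.max?_isMax hx b ((hmem b).mpr hb')
    simp only at hab hba
    congr 1
    omega

theorem pvScan_eq (nums : List Int) (k : Int) (t : Nat) (acc : List Int) (ht : t ≤ nums.length) :
    pvScanA (pvCyclic nums 0) k t acc =
      pvScanB (PySem.Set.ofList nums) k (nums.length : Int) ((t : Int) + 1) acc := by
  obtain ⟨hl, -, -⟩ := pvCyclic_inv nums 0 (fun s hs => absurd hs (by omega))
  obtain ⟨f, hf⟩ : ∃ f, nums.length - t = f := ⟨_, rfl⟩
  induction f generalizing t acc with
  | zero =>
    rw [pvScanA, pvScanB, dif_neg (by omega), dif_neg (by push_cast; omega)]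
  | succ f ihf =>
    have htlt : t < nums.length := by omega
    rw [pvScanA, pvScanB, dif_pos (by omega), dif_pos (by push_cast; omega)]
    have hc : ((pvCyclic nums 0).getD t 0 ≠ (t : Int) + 1) ↔
        ¬ (PySem.Set.contains (PySem.Set.ofList nums) ((t : Int) + 1) = true) := by
      rw [not_iff_not, pvCyclic_char nums t htlt]
      constructor
      · intro h
        simp [PySem.Set.contains, PySem.Set.mem_ofList, h]
      · intro h
        simpa [PySem.Set.contains, PySem.Set.mem_ofList] using h
    by_cases hcond : (pvCyclic nums 0).getD t 0 = (t : Int) + 1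
    · rw [if_neg (by simpa using hcond), if_neg (by simpa using hc.not_left.mp (by simpa using hcond))]
      have := ihf (t + 1) acc (by omega) (by omega)
      push_cast at this ⊢
      convert this using 3
    · rw [if_pos hcond, if_pos (hc.mp hcond)]
      by_cases hk : ((acc ++ [(t : Int) + 1]).length : Int) = k
      · rw [if_pos hk, if_pos hk]
      · rw [if_neg hk, if_neg hk]
        have := ihf (t + 1) (acc ++ [(t : Int) + 1]) (by omega) (by omega)
        push_cast at this ⊢
        convert this using 3

theorem pvPad_eq (k : Int) (acc : List Int) (m : Int) :
    pvPadA k acc m = acc ++ PySem.List.pyRange m (m + (k - acc.length)) 1 := by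
  obtain ⟨f, hf⟩ : ∃ f, (k - acc.length).toNat = f := ⟨_, rfl⟩
  induction f generalizing acc m with
  | zero =>
    rw [pvPadA, if_neg (by omega)]
    rw [PySem.List.pyRange_one_eq_nil (by omega)]
    simp
  | succ f ihf =>
    have hlt : (acc.length : Int) < k := by omega
    rw [pvPadA, if_pos hlt]
    rw [ihf (acc ++ [m]) (m + 1) (by simp; omega)]
    rw [PySem.List.pyRange_one_cons (show m < m + (k - acc.length) by omega)]
    simp only [List.append_assoc, List.singleton_append, List.length_append, List.length_singleton]
    congr 2
    push_cast
    ring_nf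

-- ===== VERDICT (by name: the statement is the Claim_ definition above) =====
theorem findFirstKMissingPositive_spec : Claim_equal_findFirstKMissingPositive := by
  intro nums k _ _
  unfold Spec_findFirstKMissingPositive findFirstKMissingPositive findFirstKMissingPositive_alt
  simp only
  have hs := pvScan_eq nums k 0 [] (Nat.zero_le _)
  norm_num at hs
  rw [← hs]
  cases hres : pvScanA (pvCyclic nums 0) k 0 [] with
  | mk r early =>
    cases early with
    | true => rfl
    | false => simp only; rw [pvMax_eq, pvPad_eq]
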